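-- pv_equiv track=rewrite | github.com/Erik-Morbach/bCNC | bCNC/ecc.py | _singleEncode
-- ===== SOURCE A (Python) =====
-- def _singleEncode(val): # TODO: LookUpTable
--     data = 0
--     data = (val&1) | (val&2) | (val&4) | ((val&8)<<1)
--
--     data |= ((val&1) ^ ((val>>1)&1) ^ ((val>>2)&1)) << 3;
--     data |= ((val&1) ^ ((val>>1)&1) ^ ((val>>3)&1)) << 5;
--     data |= ((val&1) ^ ((val>>2)&1) ^ ((val>>3)&1)) << 6;
--
--     for i in range(0,7):
--         data ^= ((data>>i)&1)<<7
--
--     return data;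
-- ===== SOURCE B (Python) =====
-- # Table-driven Hamming(8,4) encoder: the 16 possible codewords, precomputed once.
-- TABLE = (0, 105, 170, 195, 204, 165, 102, 15, 240, 153, 90, 51, 60, 85, 150, 255)
--
-- def _singleEncode(val):
--     return TABLE[val & 0xF]
-- ===== Notes on version B (the rewrite author's own statement) =====
-- stated objective: simpler
-- what changed: The per-bit parity arithmetic and the 7-iteration overall-parity loop are replaced by a single lookup into a precomputed 16-entry codeword table indexed by val & 0xF.
import Mathlib
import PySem

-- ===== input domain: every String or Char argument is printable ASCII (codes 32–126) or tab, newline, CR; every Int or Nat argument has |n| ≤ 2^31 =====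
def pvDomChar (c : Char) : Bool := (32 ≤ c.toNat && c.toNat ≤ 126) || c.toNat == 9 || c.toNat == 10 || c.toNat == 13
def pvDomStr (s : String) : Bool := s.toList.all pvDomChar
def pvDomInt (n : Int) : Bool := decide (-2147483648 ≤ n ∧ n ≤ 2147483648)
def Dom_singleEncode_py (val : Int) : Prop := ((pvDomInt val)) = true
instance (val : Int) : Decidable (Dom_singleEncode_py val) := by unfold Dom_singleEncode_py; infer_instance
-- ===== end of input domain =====

-- B replaces the parity-bit arithmetic and the 7-step parity loop by one lookup in a
-- precomputed 16-entry codeword table indexed by val & 0xF.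

-- ===== PORT A =====
def singleEncode_py (val : Int) : Int :=
  let data : Int := 0
  let data := PySem.Int.bor (PySem.Int.bor (PySem.Int.bor (PySem.Int.band val 1) (PySem.Int.band val 2)) (PySem.Int.band val 4)) ((PySem.Int.band val 8) <<< 1)
  let data := PySem.Int.bor data ((PySem.Int.bxor (PySem.Int.bxor (PySem.Int.band val 1) (PySem.Int.band (val >>> (1:Nat)) 1)) (PySem.Int.band (val >>> (2:Nat)) 1)) <<< 3)
  let data := PySem.Int.bor data ((PySem.Int.bxor (PySem.Int.bxor (PySem.Int.band val 1) (PySem.Int.band (val >>> (1:Nat)) 1)) (PySem.Int.band (val >>> (3:Nat)) 1)) <<< 5)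
  let data := PySem.Int.bor data ((PySem.Int.bxor (PySem.Int.bxor (PySem.Int.band val 1) (PySem.Int.band (val >>> (2:Nat)) 1)) (PySem.Int.band (val >>> (3:Nat)) 1)) <<< 6)
  let data := (PySem.List.pyRange 0 7 1).foldl
    (fun data i => PySem.Int.bxor data ((PySem.Int.band (data >>> i.toNat) 1) <<< 7)) data
  data

-- ===== PORT B =====
def pvTable : List Int := [0, 105, 170, 195, 204, 165, 102, 15, 240, 153, 90, 51, 60, 85, 150, 255]

-- TABLE[val & 0xF]; the index is always in 0..15 so the getD default is never used (exact).
def singleEncode_py_alt (val : Int) : Int :=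
  PySem.List.pyGetD pvTable (PySem.Int.band val 15) 0

-- ===== PRECONDITION & SPEC =====
def Spec_singleEncode_py (val : Int) (out : Int) : Prop := out = singleEncode_py_alt val
instance (val : Int) (out : Int) : Decidable (Spec_singleEncode_py val out) := by unfold Spec_singleEncode_py; infer_instance

-- ===== CLAIM (what is proved, stated in full; the proofs are below) =====
def Claim_equal_singleEncode_py : Prop := ∀ (val : Int), Dom_singleEncode_py val → Spec_singleEncode_py val (singleEncode_py val)

-- ===== LEMMAS AND PROOFS =====

-- Nat bit-extraction as division/modulus
lemma pvNatBit (n k : Nat) : n &&& 2 ^ k = n / 2 ^ k % 2 * 2 ^ k := by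
  rw [Nat.and_two_pow, Nat.toNat_testBit]

lemma pvB1 (n : Nat) : n &&& 1 = n % 2 := Nat.and_one_is_mod n
lemma pvB2 (n : Nat) : n &&& 2 = n / 2 % 2 * 2 := pvNatBit n 1
lemma pvB4 (n : Nat) : n &&& 4 = n / 4 % 2 * 4 := pvNatBit n 2
lemma pvB8 (n : Nat) : n &&& 8 = n / 8 % 2 * 8 := pvNatBit n 3
lemma pvB15 (n : Nat) : n &&& 15 = n % 16 := Nat.and_two_pow_sub_one_eq_mod n 4

lemma pvBandOfNat (n b : Nat) : PySem.Int.band ((n : Nat) : Int) ((b : Nat) : Int) = ((n &&& b : Nat) : Int) :=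
  PySem.Int.band_natCast n b

lemma pvBandNegSucc (n b : Nat) : PySem.Int.band (Int.negSucc n) ((b : Nat) : Int) = ((b - (b &&& n) : Nat) : Int) := by
  simp only [PySem.Int.band, Int.negSucc_eq]
  rw [if_neg (by omega), if_pos (by omega)]
  have e : -(-((n : Int) + 1)) - 1 = (n : Int) := by ring
  rw [e]
  simp

lemma pvShiftOfNat (n k : Nat) : ((n : Nat) : Int) >>> k = ((n >>> k : Nat) : Int) := rfl
lemma pvShiftNegSucc (n k : Nat) : Int.negSucc n >>> k = Int.negSucc (n >>> k) := rfl

lemma pvE1 (val : Int) : PySem.Int.band val 1 = PySem.Int.band (PySem.Int.band val 15) 1 := by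
  cases val with
  | ofNat n =>
    simp only [Int.ofNat_eq_natCast]
    rw [show (1:Int) = ((1:Nat):Int) from rfl, show (15:Int) = ((15:Nat):Int) from rfl,
        pvBandOfNat, pvBandOfNat, pvBandOfNat]
    congr 1; rw [pvB1, pvB1, pvB15]; omega
  | negSucc n =>
    rw [show (1:Int) = ((1:Nat):Int) from rfl, show (15:Int) = ((15:Nat):Int) from rfl,
        pvBandNegSucc, pvBandNegSucc, pvBandOfNat]
    congr 1; rw [Nat.and_comm 1 n, Nat.and_comm 15 n, pvB1, pvB1, pvB15]; omega

lemma pvE2 (val : Int) : PySem.Int.band val 2 = PySem.Int.band (PySem.Int.band val 15) 2 := by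
  cases val with
  | ofNat n =>
    simp only [Int.ofNat_eq_natCast]
    rw [show (2:Int) = ((2:Nat):Int) from rfl, show (15:Int) = ((15:Nat):Int) from rfl,
        pvBandOfNat, pvBandOfNat, pvBandOfNat]
    congr 1; rw [pvB2, pvB2, pvB15]; omega
  | negSucc n =>
    rw [show (2:Int) = ((2:Nat):Int) from rfl, show (15:Int) = ((15:Nat):Int) from rfl,
        pvBandNegSucc, pvBandNegSucc, pvBandOfNat]
    congr 1; rw [Nat.and_comm 2 n, Nat.and_comm 15 n, pvB2, pvB2, pvB15]; omega

lemma pvE4 (val : Int) : PySem.Int.band val 4 = PySem.Int.band (PySem.Int.band val 15) 4 := by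
  cases val with
  | ofNat n =>
    simp only [Int.ofNat_eq_natCast]
    rw [show (4:Int) = ((4:Nat):Int) from rfl, show (15:Int) = ((15:Nat):Int) from rfl,
        pvBandOfNat, pvBandOfNat, pvBandOfNat]
    congr 1; rw [pvB4, pvB4, pvB15]; omega
  | negSucc n =>
    rw [show (4:Int) = ((4:Nat):Int) from rfl, show (15:Int) = ((15:Nat):Int) from rfl,
        pvBandNegSucc, pvBandNegSucc, pvBandOfNat]
    congr 1; rw [Nat.and_comm 4 n, Nat.and_comm 15 n, pvB4, pvB4, pvB15]; omega

lemma pvE8 (val : Int) : PySem.Int.band val 8 = PySem.Int.band (PySem.Int.band val 15) 8 := by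
  cases val with
  | ofNat n =>
    simp only [Int.ofNat_eq_natCast]
    rw [show (8:Int) = ((8:Nat):Int) from rfl, show (15:Int) = ((15:Nat):Int) from rfl,
        pvBandOfNat, pvBandOfNat, pvBandOfNat]
    congr 1; rw [pvB8, pvB8, pvB15]; omega
  | negSucc n =>
    rw [show (8:Int) = ((8:Nat):Int) from rfl, show (15:Int) = ((15:Nat):Int) from rfl,
        pvBandNegSucc, pvBandNegSucc, pvBandOfNat]
    congr 1; rw [Nat.and_comm 8 n, Nat.and_comm 15 n, pvB8, pvB8, pvB15]; omega

lemma pvS (val : Int) (k : Nat) (hk : k ≤ 3) :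
    PySem.Int.band (val >>> k) 1 = PySem.Int.band (PySem.Int.band val 15 >>> k) 1 := by
  cases val with
  | ofNat n =>
    simp only [Int.ofNat_eq_natCast]
    rw [show (1:Int) = ((1:Nat):Int) from rfl, show (15:Int) = ((15:Nat):Int) from rfl,
        pvBandOfNat, pvShiftOfNat, pvShiftOfNat, pvBandOfNat, pvBandOfNat]
    congr 1
    rw [pvB1, pvB1, pvB15, Nat.shiftRight_eq_div_pow, Nat.shiftRight_eq_div_pow]
    interval_cases k <;> omega
  | negSucc n =>
    rw [show (1:Int) = ((1:Nat):Int) from rfl, show (15:Int) = ((15:Nat):Int) from rfl,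
        pvShiftNegSucc, pvBandNegSucc, pvBandNegSucc, pvShiftOfNat, pvBandOfNat]
    congr 1
    rw [Nat.and_comm 1, Nat.and_comm 15, pvB1, pvB1, pvB15,
        Nat.shiftRight_eq_div_pow, Nat.shiftRight_eq_div_pow]
    interval_cases k <;> omega

lemma pvBounds (val : Int) : 0 ≤ PySem.Int.band val 15 ∧ PySem.Int.band val 15 < 16 := by
  cases val with
  | ofNat n =>
    simp only [Int.ofNat_eq_natCast]
    rw [show (15:Int) = ((15:Nat):Int) from rfl, pvBandOfNat, pvB15]; omega
  | negSucc n =>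
    rw [show (15:Int) = ((15:Nat):Int) from rfl, pvBandNegSucc]; omega

lemma pvLow (val : Int) : singleEncode_py val = singleEncode_py (PySem.Int.band val 15) := by
  simp only [singleEncode_py]
  rw [pvE1, pvE2, pvE4, pvE8, pvS val 1 (by omega), pvS val 2 (by omega), pvS val 3 (by omega)]

-- ===== VERDICT (by name: the statement is the Claim_ definition above) =====
theorem singleEncode_py_spec : Claim_equal_singleEncode_py := by
  intro val _
  unfold Spec_singleEncode_py singleEncode_py_alt
  rw [pvLow]
  obtain ⟨h0, h1⟩ := pvBounds val
  revert h0 h1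
  generalize PySem.Int.band val 15 = m
  intro h0 h1
  interval_cases m <;> decide
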